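-- pv_equiv track=rewrite | github.com/suyogdahal/nep-ipo-reminder | pipeline.py | fold_ics
-- ===== SOURCE A (Python) =====
-- def fold_ics(ics: str, limit: int = 70) -> str:
--     lines = ics.split("\r\n")
--     folded = []
--     for line in lines:
--         if len(line) <= limit:
--             folded.append(line)
--             continue
--         while len(line) > limit:
--             folded.append(line[:limit])
--             line = " " + line[limit:]
--         folded.append(line)
--     return "\r\n".join(folded)
-- ===== SOURCE B (Python) =====
-- def fold_ics(ics: str, limit: int = 70) -> str:
--     def fold_line(line):
--         L = len(line)
--         if L <= limit:
--             return [line]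
--         step = limit - 1
--         nchunks = -((limit - L) // step)  # ceil((L - limit) / step)
--         return [line[:limit]] + [" " + line[limit + k * step: limit + (k + 1) * step]
--                                  for k in range(nchunks)]
--     return "\r\n".join(chunk for line in ics.split("\r\n") for chunk in fold_line(line))
-- ===== Notes on version B (the rewrite author's own statement) =====
-- stated objective: faster
-- what changed: B replaces A's destructive while loop (which rebuilds the whole remaining tail via line = ' ' + line[limit:] on every iteration) by computing the number of continuation chunks in closed form (ceil((L-limit)/(limit-1)) via floor division) and slicing each chunk directly by index in a comprehension over range(nchunks), flattening everything with a single generator join.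
import Mathlib
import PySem

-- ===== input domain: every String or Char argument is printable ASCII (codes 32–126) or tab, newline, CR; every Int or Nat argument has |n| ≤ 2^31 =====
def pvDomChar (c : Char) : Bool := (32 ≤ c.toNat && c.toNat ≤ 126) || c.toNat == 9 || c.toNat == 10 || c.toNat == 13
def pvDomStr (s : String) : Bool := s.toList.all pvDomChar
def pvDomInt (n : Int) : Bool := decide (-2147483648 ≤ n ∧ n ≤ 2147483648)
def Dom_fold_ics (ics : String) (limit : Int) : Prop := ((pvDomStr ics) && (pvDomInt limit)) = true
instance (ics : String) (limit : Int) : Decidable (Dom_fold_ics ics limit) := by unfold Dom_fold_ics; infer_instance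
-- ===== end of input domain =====

-- B computes the number of continuation chunks of an over-long line in closed form and slices each
-- chunk directly by index, instead of A's repeated rebuilding of the whole tail (faster: linear
-- instead of quadratic per long line).

def pvCRLF : List Char := ['\r', '\n']

-- ===== PORT A =====
-- A's while loop: while len(line) > limit: folded.append(line[:limit]); line = " " + line[limit:]
-- then folded.append(line).  Fuel = the line's length suffices on every input admitted by Pre_
-- (limit ≥ 2 makes the length drop by limit-1 ≥ 1 each iteration).
def pvFoldLineA : Nat → List Char → Int → List (List Char)
  | 0, line, _ => [line]
  | fuel + 1, line, limit =>
    if limit < (line.length : Int) then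
      PySem.List.slice line none (some limit) ::
        pvFoldLineA fuel (' ' :: PySem.List.slice line (some limit) none) limit
    else [line]

def fold_ics (ics : String) (limit : Int) : String :=
  let lines := PySem.Chars.splitOn ics.toList pvCRLF
  let folded := lines.foldl (fun acc line =>
    if (line.length : Int) ≤ limit then acc ++ [line]
    else acc ++ pvFoldLineA line.length line limit) []
  String.ofList (PySem.Chars.join pvCRLF folded)

-- ===== PORT B =====
-- B's fold_line: short line → [line]; long line → [line[:limit]] followed by a comprehension
-- [" " + line[limit + k*step : limit + (k+1)*step] for k in range(nchunks)],
-- nchunks = -((limit - L) // step).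
def pvFoldLineB (line : List Char) (limit : Int) : List (List Char) :=
  if (line.length : Int) ≤ limit then [line]
  else
    let step := limit - 1
    let nchunks := -(PySem.Int.floordiv (limit - (line.length : Int)) step)
    PySem.List.slice line none (some limit) ::
      (PySem.List.pyRange 0 nchunks 1).map (fun k =>
        ' ' :: PySem.List.slice line (some (limit + k * step)) (some (limit + (k + 1) * step)))

def fold_ics_alt (ics : String) (limit : Int) : String :=
  String.ofList (PySem.Chars.join pvCRLF
    ((PySem.Chars.splitOn ics.toList pvCRLF).flatMap (fun line => pvFoldLineB line limit)))

-- ===== PRECONDITION & SPEC =====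
-- Pre_ excludes exactly the inputs on which A never returns (infinite loop): limit ≤ 1 while some
-- line is longer than limit (then " " + line[limit:] never gets shorter).  A returns on all other inputs.
def Pre_fold_ics (ics : String) (limit : Int) : Prop :=
  2 ≤ limit ∨ ∀ l ∈ PySem.Chars.splitOn ics.toList pvCRLF, (l.length : Int) ≤ limit

instance (ics : String) (limit : Int) : Decidable (Pre_fold_ics ics limit) := by
  unfold Pre_fold_ics; infer_instance

def pvWitness_fold_ics : String × Int := ("AB\r\nLONG LINE!", 4)

def Spec_fold_ics (ics : String) (limit : Int) (out : String) : Prop := out = fold_ics_alt ics limit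
instance (ics : String) (limit : Int) (out : String) : Decidable (Spec_fold_ics ics limit out) := by
  unfold Spec_fold_ics; infer_instance

-- ===== CLAIM (what is proved, stated in full; the proofs are below) =====
def Claim_equal_fold_ics : Prop := ∀ (ics : String) (limit : Int), Dom_fold_ics ics limit → Pre_fold_ics ics limit → Spec_fold_ics ics limit (fold_ics ics limit)

-- ===== LEMMAS AND PROOFS =====

-- Core invariant: A's loop running on " " + line[p:] produces exactly the n chunks
-- ' ' :: line[p + k*step : p + (k+1)*step] for k < n, where n = ceil((len - p) / step).
theorem pvLoop_eq (line : List Char) (limit : Int) (h2 : 2 ≤ limit) :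
    ∀ (n : Nat) (fa : Nat) (p : Nat), p < line.length → line.length - p ≤ fa →
      ((n : Int) - 1) * (limit - 1) < (line.length : Int) - p →
      (line.length : Int) - p ≤ (n : Int) * (limit - 1) →
      pvFoldLineA fa (' ' :: line.drop p) limit =
        (List.range n).map (fun (k : Nat) =>
          ' ' :: PySem.List.slice line (some ((p : Int) + (k : Int) * (limit - 1)))
                   (some ((p : Int) + ((k : Int) + 1) * (limit - 1)))) := by
  intro n
  induction n with
  | zero =>
    intro fa p hp _ _ hub
    exfalso
    have : (p : Int) < (line.length : Int) := by exact_mod_cast hp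
    simp at hub
    omega
  | succ n ih =>
    intro fa p hp hfa hlb hub
    have hlen : ((' ' :: line.drop p).length : Int) = (line.length : Int) - p + 1 := by
      simp [List.length_drop]; omega
    by_cases hc : limit - 1 < (line.length : Int) - p
    · -- the loop iterates once more; fa ≥ 1 since line.length - p ≥ 2
      have hA : limit < ((' ' :: line.drop p).length : Int) := by rw [hlen]; omega
      have hgapN : limit.toNat ≤ line.length - p := by omega
      obtain ⟨fa', rfl⟩ : ∃ fa', fa = fa' + 1 := ⟨fa - 1, by omega⟩
      rw [pvFoldLineA, if_pos hA]
      -- n ≥ 1 on this branch: n = 0 would give line.length - p ≤ limit - 1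
      have hn1 : 1 ≤ n := by
        by_contra h
        have : n = 0 := by omega
        subst this
        simp at hub
        omega
      rw [List.range_succ_eq_map, List.map_cons, List.map_map]
      -- heads
      have hstep : (p : Int) + ((0 : Nat) : Int) * (limit - 1) = (p : Int) := by push_cast; ring
      have hq : (p : Int) + (((0 : Nat) : Int) + 1) * (limit - 1) = ((p + (limit.toNat - 1) : Nat) : Int) := by
        push_cast; omega
      have hhead :
          PySem.List.slice (' ' :: line.drop p) none (some limit) =
            ' ' :: PySem.List.slice line (some ((p : Int) + ((0 : Nat) : Int) * (limit - 1)))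
              (some ((p : Int) + (((0 : Nat) : Int) + 1) * (limit - 1))) := by
        rw [PySem.List.slice_to _ (by omega : (0:Int) ≤ limit)]
        rw [hstep, hq, PySem.List.slice_natCast]
        have hl : limit.toNat = (limit.toNat - 1) + 1 := by omega
        rw [hl, List.take_succ_cons]
        congr 1
        congr 1
        omega
      rw [hhead]
      congr 1
      · -- tails: A's new state is " " + line[p + (limit-1):]
        have htail :
            (' ' :: PySem.List.slice (' ' :: line.drop p) (some limit) none) =
              ' ' :: line.drop (p + (limit.toNat - 1)) := by
          rw [PySem.List.slice_from _ (by omega : (0:Int) ≤ limit)]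
          congr 1
          have hl : limit.toNat = (limit.toNat - 1) + 1 := by omega
          rw [hl, List.drop_succ_cons, List.drop_drop]
          congr 1
        rw [htail]
        have hcast2 : ((p + (limit.toNat - 1) : Nat) : Int) = (p : Int) + limit - 1 := by
          push_cast; omega
        have hlb' : (n : Int) * (limit - 1) < (line.length : Int) - p := by
          have h := hlb; push_cast at h; nlinarith [h]
        have hub' : (line.length : Int) - p ≤ ((n : Int) + 1) * (limit - 1) := by
          have h := hub; push_cast at h; nlinarith [h]
        have hlbI : ((n : Int) - 1) * (limit - 1) < (line.length : Int) - ((p + (limit.toNat - 1) : Nat) : Int) := by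
          rw [hcast2]; nlinarith [hlb']
        have hubI : (line.length : Int) - ((p + (limit.toNat - 1) : Nat) : Int) ≤ (n : Int) * (limit - 1) := by
          rw [hcast2]; nlinarith [hub']
        rw [ih fa' (p + (limit.toNat - 1))
          (by have h := hlb'; have h1 : 1 ≤ (n : Int) := by exact_mod_cast hn1
              have : (limit : Int) - 1 ≤ (n : Int) * (limit - 1) := by nlinarith
              omega)
          (by omega) hlbI hubI]
        apply List.map_congr_left
        intro k _
        have e1 : ((p + (limit.toNat - 1) : Nat) : Int) + (k : Int) * (limit - 1)
             = (p : Int) + (((k + 1 : Nat) : Int)) * (limit - 1) := by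
          rw [hcast2]; push_cast; ring
        have e2 : ((p + (limit.toNat - 1) : Nat) : Int) + ((k : Int) + 1) * (limit - 1)
             = (p : Int) + ((((k + 1 : Nat) : Int)) + 1) * (limit - 1) := by
          rw [hcast2]; push_cast; ring
        simp only [Function.comp, Nat.succ_eq_add_one]
        rw [e1, e2]
    · -- final piece: the remainder fits; n must be 1
      have hA : ¬ limit < ((' ' :: line.drop p).length : Int) := by rw [hlen]; omega
      have hn0 : n = 0 := by
        by_contra h
        have h1 : 1 ≤ (n : Int) := by exact_mod_cast Nat.one_le_iff_ne_zero.mpr h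
        have : ((n + 1 : Nat) : Int) - 1 = (n : Int) := by push_cast; ring
        rw [this] at hlb
        nlinarith
      subst hn0
      have hfinal :
          ' ' :: PySem.List.slice line (some ((p : Int) + ((0 : Nat) : Int) * (limit - 1)))
            (some ((p : Int) + (((0 : Nat) : Int) + 1) * (limit - 1))) = ' ' :: line.drop p := by
        have hstep : (p : Int) + ((0 : Nat) : Int) * (limit - 1) = ((p : Nat) : Int) := by push_cast; ring
        have hq : (p : Int) + (((0 : Nat) : Int) + 1) * (limit - 1) = ((p + (limit.toNat - 1) : Nat) : Int) := by
          push_cast; omega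
        rw [hstep, hq, PySem.List.slice_natCast]
        congr 1
        apply List.take_of_length_le
        simp [List.length_drop]
        omega
      have hrange : (List.range 1).map (fun (k : Nat) =>
          ' ' :: PySem.List.slice line (some ((p : Int) + (k : Int) * (limit - 1)))
            (some ((p : Int) + ((k : Int) + 1) * (limit - 1)))) = [' ' :: line.drop p] := by
        simp only [List.range_one, List.map_cons, List.map_nil]
        rw [hfinal]
      rw [hrange]
      cases fa with
      | zero => rfl
      | succ m => rw [pvFoldLineA, if_neg hA]

-- Per-line equality: on admitted lines A's loop output is B's closed-form chunk list.
theorem pvLine_eq (line : List Char) (limit : Int)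
    (h : 2 ≤ limit ∨ (line.length : Int) ≤ limit) :
    (if (line.length : Int) ≤ limit then [line]
     else pvFoldLineA line.length line limit) = pvFoldLineB line limit := by
  unfold pvFoldLineB
  by_cases hs : (line.length : Int) ≤ limit
  · simp [hs]
  · have h2 : 2 ≤ limit := h.resolve_right hs
    have hlong : limit < (line.length : Int) := by omega
    rw [if_neg hs, if_neg hs]
    -- ceil bounds for nchunks
    set L : Int := (line.length : Int) with hLdef
    set step : Int := limit - 1 with hstepdef
    set nc : Int := -(PySem.Int.floordiv (limit - L) step) with hncdef
    have hstep_pos : 0 < step := by omega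
    have hfd : PySem.Int.floordiv (limit - L) step = (limit - L) / step := by
      unfold PySem.Int.floordiv
      rw [Int.fdiv_eq_ediv]
      simp [hstep_pos.le]
    have hdiv : step * ((limit - L) / step) + (limit - L) % step = limit - L :=
      Int.mul_ediv_add_emod _ _
    have hr0 : 0 ≤ (limit - L) % step := Int.emod_nonneg _ (by omega)
    have hr1 : (limit - L) % step < step := Int.emod_lt_of_pos _ hstep_pos
    have hub : L - limit ≤ nc * step := by rw [hncdef, hfd]; nlinarith [hdiv]
    have hlb : (nc - 1) * step < L - limit := by rw [hncdef, hfd]; nlinarith [hdiv]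
    have hnc_pos : 0 < nc := by nlinarith
    obtain ⟨n, hn⟩ : ∃ n : Nat, (n : Int) = nc := ⟨nc.toNat, by omega⟩
    -- unfold A's loop once: head chunk + loop on " " + line[limit:]
    obtain ⟨K, hK⟩ : ∃ K, line.length = K + 1 := ⟨line.length - 1, by omega⟩
    rw [hK, pvFoldLineA, if_pos hlong]
    congr 1
    have hdrop : ' ' :: PySem.List.slice line (some limit) none = ' ' :: line.drop limit.toNat := by
      rw [PySem.List.slice_from _ (by omega : (0:Int) ≤ limit)]
    rw [hdrop]
    have hcast : ((limit.toNat : Nat) : Int) = limit := by omega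
    rw [pvLoop_eq line limit h2 n K limit.toNat (by omega) (by omega)
      (by rw [hcast, hn]; omega) (by rw [hcast, hn]; omega)]
    -- match B's map over pyRange 0 nc 1 with the map over List.range n
    rw [PySem.List.pyRange_one, List.map_map]
    have hcount : (nc - 0).toNat = n := by omega
    rw [hcount]
    apply List.map_congr_left
    intro k _
    simp only [Function.comp]
    rw [hcast, hstepdef]
    ring_nf

-- ===== VERDICT (by name: the statement is the Claim_ definition above) =====
theorem fold_ics_spec : Claim_equal_fold_ics := by
  intro ics limit _ hpre
  unfold Spec_fold_ics fold_ics fold_ics_alt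
  show String.ofList (PySem.Chars.join pvCRLF (List.foldl
        (fun acc line => if ((line.length : Int)) ≤ limit then acc ++ [line]
          else acc ++ pvFoldLineA line.length line limit) [] (PySem.Chars.splitOn ics.toList pvCRLF)))
     = String.ofList (PySem.Chars.join pvCRLF
        ((PySem.Chars.splitOn ics.toList pvCRLF).flatMap (fun line => pvFoldLineB line limit)))
  refine congrArg _ (congrArg _ ?_)
  rw [PySem.List.foldl_congr_mem _ _
    (fun acc line => acc ++ pvFoldLineB line limit) []
    (fun acc line hmem => by
      show _ = acc ++ pvFoldLineB line limit
      rw [← pvLine_eq line limit (hpre.imp id (fun h => h line hmem))]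
      by_cases hs : ((line.length : Int)) ≤ limit <;> simp [hs])]
  rw [PySem.List.foldl_append_eq_flatMap]
  simp
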